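-- pv_equiv track=rewrite | github.com/ratnesh003/temp-work-repo | OriginalHTMLValidator.py | is_camel_case
-- ===== SOURCE A (Python) =====
-- def is_camel_case(s):
--     if not isinstance(s, str):
--         return False
--
--     # Remove brackets from the string
--     brackets = "[]{}()"
--     s_clean = ''.join(c for c in s if c not in brackets)
--
--     return (
--         s_clean != s_clean.lower() and
--         s_clean != s_clean.upper() and
--         "_" not in s_clean and
--         " " not in s_clean and
--         any(c.isupper() for c in s_clean[1:])
--     )
-- ===== SOURCE B (Python) =====
-- def is_camel_case(s):
--     if not isinstance(s, str):
--         return False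
--     i = 0
--     has_upper = has_lower = bad = upper_after = False
--     for c in s:
--         if c in "[]{}()":
--             continue
--         if c.isupper():
--             has_upper = True
--             if i >= 1:
--                 upper_after = True
--         if c.islower():
--             has_lower = True
--         if c == '_' or c == ' ':
--             bad = True
--         i += 1
--     return has_upper and has_lower and not bad and upper_after
-- ===== Notes on version B (the rewrite author's own statement) =====
-- stated objective: alternative
-- what changed: Replaces the cleaned-copy construction plus five separate scans (two whole-string case comparisons, two substring searches, one any-scan over a slice) with a single flag-maintaining loop over the original characters that skips brackets inline and allocates no intermediate strings; it trades C-level built-in passes for one explicit pass.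
import Mathlib
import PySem

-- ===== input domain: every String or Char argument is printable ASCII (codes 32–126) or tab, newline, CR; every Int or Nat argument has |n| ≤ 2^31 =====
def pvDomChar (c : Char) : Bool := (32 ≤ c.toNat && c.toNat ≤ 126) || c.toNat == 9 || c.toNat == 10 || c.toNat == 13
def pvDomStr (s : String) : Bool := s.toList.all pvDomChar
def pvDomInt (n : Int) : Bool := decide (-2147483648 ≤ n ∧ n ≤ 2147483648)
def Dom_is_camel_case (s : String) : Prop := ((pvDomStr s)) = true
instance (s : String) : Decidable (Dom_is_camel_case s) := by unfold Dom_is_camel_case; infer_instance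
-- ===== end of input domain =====

-- B fuses A's cleaned-copy + five separate scans into one flag-maintaining single pass (objective: alternative).

-- ===== PORT A =====
-- s_clean = ''.join(c for c in s if c not in brackets)
def is_camel_case (s : String) : Bool :=
  let brackets : List Char := "[]{}()".toList
  let sClean : List Char := s.toList.filter (fun c => !(brackets.contains c))
  decide (sClean ≠ PySem.Chars.lower sClean) &&
  decide (sClean ≠ PySem.Chars.upper sClean) &&
  !(PySem.Chars.isIn ['_'] sClean) &&
  !(PySem.Chars.isIn [' '] sClean) &&
  (PySem.List.slice sClean (some 1) none).any PySem.Chars.isupper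

-- ===== PORT B =====
-- state: (index among non-bracket chars, has_upper, has_lower, bad, upper_after)
def camelStep (st : Nat × Bool × Bool × Bool × Bool) (c : Char) : Nat × Bool × Bool × Bool × Bool :=
  if ("[]{}()".toList.contains c) then st
  else
    (st.1 + 1,
     st.2.1 || PySem.Chars.isupper c,
     st.2.2.1 || PySem.Chars.islower c,
     st.2.2.2.1 || (c == '_' || c == ' '),
     st.2.2.2.2 || (PySem.Chars.isupper c && decide (1 ≤ st.1)))

def is_camel_case_alt (s : String) : Bool :=
  let st := s.toList.foldl camelStep (0, false, false, false, false)
  st.2.1 && st.2.2.1 && !st.2.2.2.1 && st.2.2.2.2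

-- ===== PRECONDITION & SPEC =====
def Spec_is_camel_case (s : String) (out : Bool) : Prop := out = is_camel_case_alt s
instance (s : String) (out : Bool) : Decidable (Spec_is_camel_case s out) := by unfold Spec_is_camel_case; infer_instance

-- ===== CLAIM (what is proved, stated in full; the proofs are below) =====
def Claim_equal_is_camel_case : Prop := ∀ (s : String), Dom_is_camel_case s → Spec_is_camel_case s (is_camel_case s)

-- ===== LEMMAS AND PROOFS =====

def pvClean (cs : List Char) : List Char :=
  cs.filter (fun c => !(("[]{}()".toList).contains c))

-- characterisation of B's fold: each flag is an `any` over the bracket-filtered characters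
lemma camel_fold_spec (cs : List Char) (i : Nat) (hu hl bad ua : Bool) :
    cs.foldl camelStep (i, hu, hl, bad, ua) =
      (i + (pvClean cs).length,
       hu || (pvClean cs).any PySem.Chars.isupper,
       hl || (pvClean cs).any PySem.Chars.islower,
       bad || (pvClean cs).any (fun c => c == '_' || c == ' '),
       ua || (if i = 0 then ((pvClean cs).drop 1).any PySem.Chars.isupper
              else (pvClean cs).any PySem.Chars.isupper)) := by
  induction cs generalizing i hu hl bad ua with
  | nil => simp [pvClean]
  | cons c cs ih =>
    by_cases hb : c ∈ "[]{}()".toList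
    · have hbt : ("[]{}()".toList).contains c = true := by simpa using hb
      have hb' : c = '[' ∨ c = ']' ∨ c = '{' ∨ c = '}' ∨ c = '(' ∨ c = ')' := by
        simpa using hb
      have h1 : pvClean (c :: cs) = pvClean cs := by
        unfold pvClean; rw [List.filter_cons]; simp; tauto
      rw [List.foldl_cons,
        show camelStep (i, hu, hl, bad, ua) c = (i, hu, hl, bad, ua) from by
          unfold camelStep; rw [if_pos hbt],
        ih, h1]
    · have hbf : ("[]{}()".toList).contains c = false := by simpa using hb
      have hb' : ¬ c = '[' ∧ ¬ c = ']' ∧ ¬ c = '{' ∧ ¬ c = '}' ∧ ¬ c = '(' ∧ ¬ c = ')' := by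
        simpa using hb
      have h1 : pvClean (c :: cs) = c :: pvClean cs := by
        unfold pvClean; rw [List.filter_cons]; simp; tauto
      rw [List.foldl_cons,
        show camelStep (i, hu, hl, bad, ua) c =
            (i + 1, hu || PySem.Chars.isupper c, hl || PySem.Chars.islower c,
             bad || (c == '_' || c == ' '),
             ua || (PySem.Chars.isupper c && decide (1 ≤ i))) from by
          unfold camelStep; rw [if_neg]; simp; tauto,
        ih, h1]
      rcases Nat.eq_zero_or_pos i with h0 | hpos
      · subst h0
        simp [Prod.mk.injEq, List.any_cons, Bool.or_assoc]
        omega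
      · have hne : ¬ i = 0 := by omega
        have h1' : decide (1 ≤ i) = true := by simpa using hpos
        simp [Prod.mk.injEq, List.any_cons, Bool.or_assoc, hne, h1']
        omega

lemma singleton_infix_iff (x : Char) (l : List Char) : [x] <:+: l ↔ x ∈ l := by
  constructor
  · intro h
    exact h.subset (by simp)
  · intro h
    obtain ⟨s, t, rfl⟩ := List.append_of_mem h
    exact ⟨s, t, by simp⟩

lemma map_fix_iff (f : Char → Char) (l : List Char) : l.map f = l ↔ ∀ x ∈ l, f x = x := by
  induction l with
  | nil => simp
  | cons a l ih => simp [ih]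

lemma lowerChar_fix (c : Char) : (PySem.Chars.lowerChar c = c) ↔ (PySem.Chars.isupper c = false) := by
  rcases hu : PySem.Chars.isupper c with _ | _
  · simp [PySem.Chars.lowerChar, hu]
  · have hb : (65 : Nat) ≤ c.toNat ∧ c.toNat ≤ 90 := by
      simpa [PySem.Chars.isupper, Char.le_def] using hu
    have hv : Nat.isValidChar (c.toNat + 32) := Or.inl (by omega)
    have hval : (Char.ofNat (c.toNat + 32)).toNat = c.toNat + 32 := by
      simp [Char.ofNat, hv]
    simp only [PySem.Chars.lowerChar, hu, if_true, Bool.true_eq_false, iff_false]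
    intro heq
    have := congrArg Char.toNat heq
    rw [hval] at this
    omega

lemma upperChar_fix (c : Char) : (PySem.Chars.upperChar c = c) ↔ (PySem.Chars.islower c = false) := by
  rcases hu : PySem.Chars.islower c with _ | _
  · simp [PySem.Chars.upperChar, hu]
  · have hb : (97 : Nat) ≤ c.toNat ∧ c.toNat ≤ 122 := by
      simpa [PySem.Chars.islower, Char.le_def] using hu
    have hv : Nat.isValidChar (c.toNat - 32) := Or.inl (by omega)
    have hval : (Char.ofNat (c.toNat - 32)).toNat = c.toNat - 32 := by
      simp [Char.ofNat, hv]
    simp only [PySem.Chars.upperChar, hu, if_true, Bool.true_eq_false, iff_false]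
    intro heq
    have := congrArg Char.toNat heq
    rw [hval] at this
    omega

-- s_clean != s_clean.lower()  ↔  some uppercase letter occurs (and the upper twin)
lemma ne_lower_iff_any_upper (l : List Char) :
    decide (l ≠ PySem.Chars.lower l) = l.any PySem.Chars.isupper := by
  rcases h : l.any PySem.Chars.isupper with _ | _
  · have hlow : PySem.Chars.lower l = l := by
      simp only [PySem.Chars.lower]
      exact (map_fix_iff _ _).mpr
        (fun x hx => (lowerChar_fix x).mpr (by simpa using List.any_eq_false.mp h x hx))
    simp [hlow]
  · obtain ⟨x, hx, hux⟩ := List.any_eq_true.mp h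
    have hne : l ≠ PySem.Chars.lower l := by
      intro he
      simp only [PySem.Chars.lower] at he
      have hfix := (map_fix_iff PySem.Chars.lowerChar l).mp he.symm x hx
      rw [lowerChar_fix, hux] at hfix
      exact absurd hfix (by simp)
    simp [hne]

lemma ne_upper_iff_any_lower (l : List Char) :
    decide (l ≠ PySem.Chars.upper l) = l.any PySem.Chars.islower := by
  rcases h : l.any PySem.Chars.islower with _ | _
  · have hup : PySem.Chars.upper l = l := by
      simp only [PySem.Chars.upper]
      exact (map_fix_iff _ _).mpr
        (fun x hx => (upperChar_fix x).mpr (by simpa using List.any_eq_false.mp h x hx))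
    simp [hup]
  · obtain ⟨x, hx, hux⟩ := List.any_eq_true.mp h
    have hne : l ≠ PySem.Chars.upper l := by
      intro he
      simp only [PySem.Chars.upper] at he
      have hfix := (map_fix_iff PySem.Chars.upperChar l).mp he.symm x hx
      rw [upperChar_fix, hux] at hfix
      exact absurd hfix (by simp)
    simp [hne]

-- '_' not in s_clean  ↔  no character equals '_'
lemma not_isIn_singleton (x : Char) (l : List Char) :
    (!(PySem.Chars.isIn [x] l)) = !(l.any (fun c => c == x)) := by
  congr 1
  rcases hm : l.any (fun c => c == x) with _ | _
  · have hx : x ∉ l := by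
      intro hmem
      have : l.any (fun c => c == x) = true := List.any_eq_true.mpr ⟨x, hmem, by simp⟩
      rw [this] at hm
      exact absurd hm (by simp)
    exact (PySem.Chars.isIn_eq_false_iff [x] l).mpr (fun hinf => hx ((singleton_infix_iff x l).mp hinf))
  · obtain ⟨c, hc, hcx⟩ := List.any_eq_true.mp hm
    have hx : x ∈ l := by
      have hcx' : c = x := by simpa using hcx
      exact hcx' ▸ hc
    exact (PySem.Chars.isIn_iff_infix [x] l).mpr ((singleton_infix_iff x l).mpr hx)

-- ===== VERDICT (by name: the statement is the Claim_ definition above) =====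
lemma any_or_split (l : List Char) (p q : Char → Bool) :
    l.any (fun c => p c || q c) = (l.any p || l.any q) := by
  induction l with
  | nil => rfl
  | cons a l ih => cases hp : p a <;> cases hq : q a <;> simp [List.any_cons, hp, hq, ih]

set_option maxHeartbeats 1000000 in
theorem is_camel_case_spec : Claim_equal_is_camel_case := by
  intro s _
  unfold Spec_is_camel_case is_camel_case is_camel_case_alt
  rw [camel_fold_spec]
  simp only [pvClean, if_true, Bool.false_or]
  rw [ne_lower_iff_any_upper, ne_upper_iff_any_lower,
      not_isIn_singleton, not_isIn_singleton, PySem.List.slice_from_one,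
      any_or_split]
  set cl := s.toList.filter (fun c => !(("[]{}()".toList).contains c)) with hcl
  have htail : cl.tail = cl.drop 1 := by simp [List.drop_one]
  rw [htail]
  cases h1 : cl.any PySem.Chars.isupper <;>
  cases h2 : cl.any PySem.Chars.islower <;>
  cases h3 : cl.any (fun c => c == '_') <;>
  cases h4 : cl.any (fun c => c == ' ') <;>
  cases h5 : (cl.drop 1).any PySem.Chars.isupper <;>
  simp_all
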